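-- pv_equiv track=rewrite | github.com/sarah-keren/RLPE | TransformSearch/greedy_search.py | dict_intersection
-- ===== SOURCE A (Python) =====
-- from collections import defaultdict
--
-- def refactor_max_cluster(max_cluster):
--     max_cluster_list = []
--     for act, act_info in max_cluster.items():
--         for idx, values in act_info.items():
--             for val in values:
--                 max_cluster_list.append((act, idx, val))
--     return max_cluster_list
--
-- def intersection(lst1, lst2):
--     lst3 = [value for value in lst1 if value in lst2]
--     return lst3
--
-- def dict_intersection(working_cluster, temp_cluster):
--     working_cluster_list = refactor_max_cluster(working_cluster)
--     temp_cluster_list = refactor_max_cluster(temp_cluster)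
--     cluster_intersection = intersection(working_cluster_list, temp_cluster_list)
--     new_working_cluster = defaultdict(dict)
--     for action, idx, val in cluster_intersection:
--         if action in new_working_cluster.keys():
--             if idx in new_working_cluster[action].keys():
--                 new_working_cluster[action][idx].append(list(val))
--             else:
--                 new_working_cluster[action][idx] = [list(val)]
--         else:
--             new_working_cluster[action] = {idx: [list(val)]}
--     return new_working_cluster
-- ===== SOURCE B (Python) =====
-- from collections import defaultdict
--
-- def dict_intersection(working_cluster, temp_cluster):
--     # One fused pass over working_cluster; temp_cluster's own nesting is the lookup index.
--     new_working_cluster = defaultdict(dict)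
--     for action, act_info in working_cluster.items():
--         for idx, values in act_info.items():
--             for val in values:
--                 if action in temp_cluster and idx in temp_cluster[action] \
--                         and val in temp_cluster[action][idx]:
--                     if action in new_working_cluster:
--                         if idx in new_working_cluster[action]:
--                             new_working_cluster[action][idx].append(list(val))
--                         else:
--                             new_working_cluster[action][idx] = [list(val)]
--                     else:
--                         new_working_cluster[action] = {idx: [list(val)]}
--     return new_working_cluster
-- ===== Notes on version B (the rewrite author's own statement) =====
-- stated objective: faster
-- what changed: A flattens both dicts into triple lists, filters one list by linear membership in the other, then regroups; B fuses everything into a single nested traversal of working_cluster that tests each value directly against temp_cluster's own nested dict (no intermediate lists, no linear scan over the flattened temp list).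
import Mathlib
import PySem

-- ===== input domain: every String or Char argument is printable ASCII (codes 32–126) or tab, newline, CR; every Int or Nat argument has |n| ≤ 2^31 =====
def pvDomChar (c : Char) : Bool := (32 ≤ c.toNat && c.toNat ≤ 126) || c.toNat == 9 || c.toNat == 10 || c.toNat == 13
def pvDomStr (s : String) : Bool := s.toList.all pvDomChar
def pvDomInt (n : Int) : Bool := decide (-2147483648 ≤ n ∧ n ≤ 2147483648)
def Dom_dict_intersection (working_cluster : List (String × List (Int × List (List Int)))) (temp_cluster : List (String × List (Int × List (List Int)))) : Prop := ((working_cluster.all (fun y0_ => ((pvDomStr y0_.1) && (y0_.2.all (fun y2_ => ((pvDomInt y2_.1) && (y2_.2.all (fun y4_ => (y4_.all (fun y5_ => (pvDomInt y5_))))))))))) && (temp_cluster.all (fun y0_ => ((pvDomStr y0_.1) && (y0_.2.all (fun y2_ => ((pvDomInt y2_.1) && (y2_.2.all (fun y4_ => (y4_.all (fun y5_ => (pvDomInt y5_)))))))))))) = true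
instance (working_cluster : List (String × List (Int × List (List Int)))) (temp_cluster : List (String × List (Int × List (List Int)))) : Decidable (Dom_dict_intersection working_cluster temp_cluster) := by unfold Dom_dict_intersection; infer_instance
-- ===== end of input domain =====

-- B fuses A's flatten/flatten/filter/regroup phases into one nested pass over working_cluster,
-- using temp_cluster's own nesting as the lookup index (objective: faster).
-- Pre_ excludes association lists with duplicate keys in temp_cluster (outer action keys, or
-- idx keys inside one action): such lists do not represent Python dicts, so nothing is lost.


-- ===== PORT A =====
-- A-side helper: flatten the nested dict into (action, idx, value) triples.
def refactor_max_cluster (max_cluster : List (String × List (Int × List (List Int)))) :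
    List (String × Int × List Int) :=
  max_cluster.foldl (fun acc p =>
    p.2.foldl (fun acc2 q =>
      q.2.foldl (fun acc3 v => acc3 ++ [(p.1, q.1, v)]) acc2) acc) []

-- A-side helper: the list comprehension [value for value in lst1 if value in lst2].
def intersection_lists (lst1 lst2 : List (String × Int × List Int)) :
    List (String × Int × List Int) :=
  lst1.filter (fun v => lst2.contains v)

def dict_intersection (working_cluster : List (String × List (Int × List (List Int)))) (temp_cluster : List (String × List (Int × List (List Int)))) : List (String × List (Int × List (List Int))) :=
  let working_cluster_list := refactor_max_cluster working_cluster
  let temp_cluster_list := refactor_max_cluster temp_cluster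
  let cluster_intersection := intersection_lists working_cluster_list temp_cluster_list
  let d := cluster_intersection.foldl (fun d tr =>
    match d.get? tr.1 with
    | some inner =>
      match inner.get? tr.2.1 with
      | some lst => d.insert tr.1 (inner.insert tr.2.1 (lst ++ [tr.2.2]))
      | none => d.insert tr.1 (inner.insert tr.2.1 [tr.2.2])
    | none => d.insert tr.1 (PySem.Dict.mk [(tr.2.1, [tr.2.2])]))
    (PySem.Dict.empty : PySem.Dict String (PySem.Dict Int (List (List Int))))
  d.items.map (fun kv => (kv.1, kv.2.items))

-- ===== PORT B =====
def dict_intersection_alt (working_cluster : List (String × List (Int × List (List Int)))) (temp_cluster : List (String × List (Int × List (List Int)))) : List (String × List (Int × List (List Int))) :=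
  let tempD := PySem.Dict.mk temp_cluster
  let d := working_cluster.foldl (fun d p =>
    p.2.foldl (fun d q =>
      q.2.foldl (fun d v =>
        if (match tempD.get? p.1 with
            | some inner =>
              match (PySem.Dict.mk inner).get? q.1 with
              | some lst => lst.contains v
              | none => false
            | none => false) then
          match d.get? p.1 with
          | some innerD =>
            match innerD.get? q.1 with
            | some lst => d.insert p.1 (innerD.insert q.1 (lst ++ [v]))
            | none => d.insert p.1 (innerD.insert q.1 [v])
          | none => d.insert p.1 (PySem.Dict.mk [(q.1, [v])])
        else d) d) d)
    (PySem.Dict.empty : PySem.Dict String (PySem.Dict Int (List (List Int))))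
  d.items.map (fun kv => (kv.1, kv.2.items))

-- ===== PRECONDITION & SPEC =====
-- Pre_ excludes temp_cluster association lists with duplicate keys (outer or inner): those do not
-- represent Python dicts, and A's flattened-list membership vs B's first-match lookup could differ.
def Pre_dict_intersection (working_cluster : List (String × List (Int × List (List Int)))) (temp_cluster : List (String × List (Int × List (List Int)))) : Prop :=
  (temp_cluster.map Prod.fst).Nodup ∧ ∀ p ∈ temp_cluster, (p.2.map Prod.fst).Nodup
instance (working_cluster : List (String × List (Int × List (List Int)))) (temp_cluster : List (String × List (Int × List (List Int)))) : Decidable (Pre_dict_intersection working_cluster temp_cluster) := by unfold Pre_dict_intersection; infer_instance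

def pvWitness_dict_intersection : (List (String × List (Int × List (List Int)))) × (List (String × List (Int × List (List Int)))) :=
  ([("a", [(0, [[1], [2]])]), ("b", [(1, [[3]])])],
   [("a", [(0, [[2], [5]]), (1, [[9]])])])

def Spec_dict_intersection (working_cluster : List (String × List (Int × List (List Int)))) (temp_cluster : List (String × List (Int × List (List Int)))) (out : List (String × List (Int × List (List Int)))) : Prop := out = dict_intersection_alt working_cluster temp_cluster
instance (working_cluster : List (String × List (Int × List (List Int)))) (temp_cluster : List (String × List (Int × List (List Int)))) (out : List (String × List (Int × List (List Int)))) : Decidable (Spec_dict_intersection working_cluster temp_cluster out) := by unfold Spec_dict_intersection; infer_instance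

-- ===== CLAIM (what is proved, stated in full; the proofs are below) =====
def Claim_equal_dict_intersection : Prop := ∀ (working_cluster : List (String × List (Int × List (List Int)))) (temp_cluster : List (String × List (Int × List (List Int)))), Dom_dict_intersection working_cluster temp_cluster → Pre_dict_intersection working_cluster temp_cluster → Spec_dict_intersection working_cluster temp_cluster (dict_intersection working_cluster temp_cluster)

-- ===== LEMMAS AND PROOFS =====

-- The flattened triple list, in closed (flatMap) form.
def pvFlat (mc : List (String × List (Int × List (List Int)))) : List (String × Int × List Int) :=
  mc.flatMap (fun p => p.2.flatMap (fun q => q.2.map (fun v => (p.1, q.1, v))))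

-- The shared regroup step on one triple.
def pvStep (d : PySem.Dict String (PySem.Dict Int (List (List Int))))
    (tr : String × Int × List Int) : PySem.Dict String (PySem.Dict Int (List (List Int))) :=
  match d.get? tr.1 with
  | some inner =>
    match inner.get? tr.2.1 with
    | some lst => d.insert tr.1 (inner.insert tr.2.1 (lst ++ [tr.2.2]))
    | none => d.insert tr.1 (inner.insert tr.2.1 [tr.2.2])
  | none => d.insert tr.1 (PySem.Dict.mk [(tr.2.1, [tr.2.2])])

-- B's membership test via temp_cluster's nesting.
def pvTest (temp_cluster : List (String × List (Int × List (List Int))))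
    (tr : String × Int × List Int) : Bool :=
  match (PySem.Dict.mk temp_cluster).get? tr.1 with
  | some inner =>
    match (PySem.Dict.mk inner).get? tr.2.1 with
    | some lst => lst.contains tr.2.2
    | none => false
  | none => false

theorem refactor_eq_flat (mc : List (String × List (Int × List (List Int)))) :
    refactor_max_cluster mc = pvFlat mc := by
  unfold refactor_max_cluster pvFlat
  simp only [PySem.List.foldl_append_singleton_eq_map, PySem.List.foldl_append_eq_flatMap]
  simp

theorem foldl_flatMap' {α β γ : Type} (l : List α) (g : α → List β) (f : γ → β → γ) (init : γ) :
    (l.flatMap g).foldl f init = l.foldl (fun acc x => (g x).foldl f acc) init := by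
  induction l generalizing init with
  | nil => rfl
  | cons a t ih => simp [List.flatMap_cons, List.foldl_append, ih]

theorem mem_flat_iff (temp : List (String × List (Int × List (List Int))))
    (hn : (temp.map Prod.fst).Nodup) (hni : ∀ p ∈ temp, (p.2.map Prod.fst).Nodup)
    (a : String) (i : Int) (v : List Int) :
    (a, i, v) ∈ pvFlat temp ↔
      ∃ inner, (PySem.Dict.mk temp).get? a = some inner ∧
        ∃ lst, (PySem.Dict.mk inner).get? i = some lst ∧ v ∈ lst := by
  have hkeys : (PySem.Dict.mk temp).keys.Nodup := hn
  constructor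
  · intro h
    simp only [pvFlat, List.mem_flatMap, List.mem_map] at h
    obtain ⟨p, hp, q, hq, x, hx, heq⟩ := h
    simp only [Prod.mk.injEq] at heq
    obtain ⟨ha, hi, hx'⟩ := heq
    subst ha hi hx'
    refine ⟨p.2, (PySem.Dict.get?_eq_some_iff_mem_items _ _ _ hkeys).2 hp, q.2, ?_, hx⟩
    have hinner : (PySem.Dict.mk p.2).keys.Nodup := hni p hp
    exact (PySem.Dict.get?_eq_some_iff_mem_items _ _ _ hinner).2 hq
  · rintro ⟨inner, h1, lst, h2, hv⟩
    have hp : (a, inner) ∈ temp := (PySem.Dict.get?_eq_some_iff_mem_items _ _ _ hkeys).1 h1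
    have hinner : (PySem.Dict.mk inner).keys.Nodup := hni (a, inner) hp
    have hq : (i, lst) ∈ inner := (PySem.Dict.get?_eq_some_iff_mem_items _ _ _ hinner).1 h2
    simp only [pvFlat, List.mem_flatMap, List.mem_map]
    exact ⟨(a, inner), hp, (i, lst), hq, v, hv, rfl⟩

theorem test_eq_contains (temp : List (String × List (Int × List (List Int))))
    (hn : (temp.map Prod.fst).Nodup) (hni : ∀ p ∈ temp, (p.2.map Prod.fst).Nodup)
    (tr : String × Int × List Int) :
    pvTest temp tr = (pvFlat temp).contains tr := by
  rcases tr with ⟨a, i, v⟩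
  have hiff := mem_flat_iff temp hn hni a i v
  rw [Bool.eq_iff_iff]
  simp only [pvTest, List.contains_iff_mem, hiff]
  cases h1 : (PySem.Dict.mk temp).get? a with
  | none => simp
  | some inner =>
    cases h2 : (PySem.Dict.mk inner).get? i with
    | none => simp [h2]
    | some lst => simp [h2]

theorem a_side (w t : List (String × List (Int × List (List Int)))) :
    dict_intersection w t =
      ((pvFlat w).foldl (fun d tr => if (pvFlat t).contains tr then pvStep d tr else d)
        PySem.Dict.empty).items.map (fun kv => (kv.1, kv.2.items)) := by
  simp only [dict_intersection, intersection_lists, refactor_eq_flat]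
  rw [← PySem.List.foldl_if_eq_foldl_filter]
  rfl

theorem b_side (w t : List (String × List (Int × List (List Int)))) :
    dict_intersection_alt w t =
      ((pvFlat w).foldl (fun d tr => if pvTest t tr then pvStep d tr else d)
        PySem.Dict.empty).items.map (fun kv => (kv.1, kv.2.items)) := by
  simp only [dict_intersection_alt, pvFlat, foldl_flatMap', List.foldl_map]
  rfl

-- ===== VERDICT (by name: the statement is the Claim_ definition above) =====
theorem dict_intersection_spec : Claim_equal_dict_intersection := by
  intro w t _ hpre
  unfold Spec_dict_intersection
  rw [a_side, b_side]
  congr 2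
  apply PySem.List.foldl_congr_mem
  intro acc tr _
  rw [test_eq_contains t hpre.1 hpre.2 tr]
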